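-- pv_equiv track=rewrite | github.com/JasonPeng2019/Math-Induction-Head | src/operator_buckets.py | _add_answer_and_carries
-- ===== SOURCE A (Python) =====
-- from typing import Any, Dict, Iterable, List, Mapping, Optional, Sequence, Tuple
--
-- def _add_answer_and_carries(a: int, b: int) -> Tuple[int, List[int]]:
--     carry = 0
--     carry_positions: List[int] = []
--     place = 0
--     aa = a
--     bb = b
--     while aa > 0 or bb > 0:
--         da = aa % 10
--         db = bb % 10
--         total = da + db + carry
--         carry_out = 1 if total >= 10 else 0
--         if carry_out:
--             carry_positions.append(place)
--         carry = carry_out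
--         aa //= 10
--         bb //= 10
--         place += 1
--     return a + b, carry_positions
-- ===== SOURCE B (Python) =====
-- from typing import List, Tuple
--
-- def _add_answer_and_carries(a: int, b: int) -> Tuple[int, List[int]]:
--     # Carry-free formulation: a carry leaves position i exactly when the low
--     # i+1 digits of a and b together overflow 10**(i+1).
--     n = 0
--     while a >= 10 ** n or b >= 10 ** n:
--         n += 1
--     return a + b, [i for i in range(n)
--                    if a % 10 ** (i + 1) + b % 10 ** (i + 1) >= 10 ** (i + 1)]
-- ===== Notes on version B (the rewrite author's own statement) =====
-- stated objective: alternative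
-- what changed: Replaced the sequential digit loop that threads a running carry through divmod state with a closed-form per-position test: position i carries iff a%10**(i+1)+b%10**(i+1) >= 10**(i+1), collected by a list comprehension over the digit count.
import Mathlib
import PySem

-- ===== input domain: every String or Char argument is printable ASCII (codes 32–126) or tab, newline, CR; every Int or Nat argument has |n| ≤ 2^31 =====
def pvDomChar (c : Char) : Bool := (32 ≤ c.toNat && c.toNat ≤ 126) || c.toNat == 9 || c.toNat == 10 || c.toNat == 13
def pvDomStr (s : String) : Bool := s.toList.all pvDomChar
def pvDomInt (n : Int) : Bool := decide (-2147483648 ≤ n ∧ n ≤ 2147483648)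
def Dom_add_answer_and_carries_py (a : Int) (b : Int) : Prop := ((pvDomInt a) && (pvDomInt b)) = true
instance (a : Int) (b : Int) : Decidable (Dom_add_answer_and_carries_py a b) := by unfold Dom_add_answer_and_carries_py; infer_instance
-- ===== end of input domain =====

-- B replaces A's sequential carry-threading loop by an independent closed-form
-- overflow test per digit position (alternative decomposition, same cost).


-- ===== PORT A =====
-- A's while loop, state = (aa, bb, carry, place, carry_positions); the Nat fuel is only a
-- totality device (aa.toNat + bb.toNat strictly decreases while the guard holds, so fuel
-- a.toNat + b.toNat + 1 is never exhausted; proved in the lemmas below)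
def addLoopA : Nat → Int → Int → Int → Int → List Int → List Int
  | 0, _, _, _, _, cps => cps
  | fuel + 1, aa, bb, carry, place, cps =>
    if aa > 0 ∨ bb > 0 then
      let da := PySem.Int.mod aa 10
      let db := PySem.Int.mod bb 10
      let total := da + db + carry
      let carry_out : Int := if total ≥ 10 then 1 else 0
      let cps' := if carry_out ≠ 0 then cps ++ [place] else cps
      addLoopA fuel (PySem.Int.floordiv aa 10) (PySem.Int.floordiv bb 10) carry_out (place + 1) cps'
    else cps

def add_answer_and_carries_py (a : Int) (b : Int) : Int × List Int :=
  (a + b, addLoopA (a.toNat + b.toNat + 1) a b 0 0 [])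

-- ===== PORT B =====
-- while a >= 10**n or b >= 10**n: n += 1   (same fuel totality device; the loop stops
-- before n exceeds a.toNat + b.toNat)
def lenLoopB : Nat → Int → Int → Nat → Nat
  | 0, _, _, n => n
  | fuel + 1, a, b, n => if a ≥ 10 ^ n ∨ b ≥ 10 ^ n then lenLoopB fuel a b (n + 1) else n

-- the comprehension's test; i comes from range(n) so it is nonnegative and i.toNat is exact
def carryTest (a b i : Int) : Bool :=
  decide (PySem.Int.mod a (10 ^ (i.toNat + 1)) + PySem.Int.mod b (10 ^ (i.toNat + 1)) ≥ (10:Int) ^ (i.toNat + 1))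

def add_answer_and_carries_py_alt (a : Int) (b : Int) : Int × List Int :=
  (a + b, (PySem.List.pyRange 0 (lenLoopB (a.toNat + b.toNat + 1) a b 0 : Int) 1).filter (carryTest a b))

-- ===== PRECONDITION & SPEC =====
def Spec_add_answer_and_carries_py (a : Int) (b : Int) (out : Int × List Int) : Prop := out = add_answer_and_carries_py_alt a b
instance (a : Int) (b : Int) (out : Int × List Int) : Decidable (Spec_add_answer_and_carries_py a b out) := by unfold Spec_add_answer_and_carries_py; infer_instance

-- ===== CLAIM (what is proved, stated in full; the proofs are below) =====
def Claim_equal_add_answer_and_carries_py : Prop := ∀ (a : Int) (b : Int), Dom_add_answer_and_carries_py a b → Spec_add_answer_and_carries_py a b (add_answer_and_carries_py a b)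

-- ===== LEMMAS AND PROOFS =====

-- any index ≥ a.toNat + b.toNat fails the loop guard
lemma cond_fails_late (a b : Int) (j : Nat) (hj : a.toNat + b.toNat ≤ j) :
    ¬ (a ≥ 10 ^ j ∨ b ≥ 10 ^ j) := by
  have h10 : (j:Int) < 10 ^ j := by exact_mod_cast (Nat.lt_pow_self (by norm_num) : j < 10 ^ j)
  omega

-- with enough fuel, lenLoopB stops at an index whose guard fails
lemma lenLoopB_not_cond (a b : Int) : ∀ (fuel k : Nat), a.toNat + b.toNat < k + fuel →
    ¬ (a ≥ 10 ^ lenLoopB fuel a b k ∨ b ≥ 10 ^ lenLoopB fuel a b k) := by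
  intro fuel
  induction fuel with
  | zero => intro k hk; exact cond_fails_late a b k (by omega)
  | succ fuel ih =>
      intro k hk
      by_cases h : a ≥ 10 ^ k ∨ b ≥ 10 ^ k
      · rw [lenLoopB, if_pos h]; exact ih (k + 1) (by omega)
      · rw [lenLoopB, if_neg h]; exact h

-- every index below the returned count satisfies the guard
lemma lenLoopB_cond (a b : Int) : ∀ (fuel k i : Nat), k ≤ i → i < lenLoopB fuel a b k →
    a ≥ 10 ^ i ∨ b ≥ 10 ^ i := by
  intro fuel
  induction fuel with
  | zero => intro k i hk hi; simp [lenLoopB] at hi; omega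
  | succ fuel ih =>
      intro k i hk hi
      by_cases h : a ≥ 10 ^ k ∨ b ≥ 10 ^ k
      · rw [lenLoopB, if_pos h] at hi
        rcases Nat.eq_or_lt_of_le hk with rfl | hlt
        · exact h
        · exact ih (k + 1) i hlt hi
      · rw [lenLoopB, if_neg h] at hi; omega

lemma lenLoopB_le (a b : Int) : ∀ (fuel k : Nat), lenLoopB fuel a b k ≤ k + fuel := by
  intro fuel
  induction fuel with
  | zero => intro k; simp [lenLoopB]
  | succ fuel ih =>
      intro k
      by_cases h : a ≥ 10 ^ k ∨ b ≥ 10 ^ k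
      · rw [lenLoopB, if_pos h]; have := ih (k + 1); omega
      · rw [lenLoopB, if_neg h]; omega

-- the guard at i holds iff i is below the digit count n
lemma cond_iff_lt_len (a b : Int) (i : Nat) :
    (a ≥ 10 ^ i ∨ b ≥ 10 ^ i) ↔ i < lenLoopB (a.toNat + b.toNat + 1) a b 0 := by
  constructor
  · intro h
    by_contra hn
    push_neg at hn
    have hnc := lenLoopB_not_cond a b (a.toNat + b.toNat + 1) 0 (by omega)
    push_neg at hnc
    have hle : (10:Int) ^ lenLoopB (a.toNat + b.toNat + 1) a b 0 ≤ 10 ^ i :=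
      pow_le_pow_right₀ (by norm_num) hn
    omega
  · exact lenLoopB_cond a b (a.toNat + b.toNat + 1) 0 i (Nat.zero_le i)

-- the digit count is at most a.toNat + b.toNat
lemma len_le_bound (a b : Int) : lenLoopB (a.toNat + b.toNat + 1) a b 0 ≤ a.toNat + b.toNat := by
  set n := lenLoopB (a.toNat + b.toNat + 1) a b 0 with hn
  by_contra hgt
  push_neg at hgt
  have h1 : n ≤ a.toNat + b.toNat + 1 := by
    have := lenLoopB_le a b (a.toNat + b.toNat + 1) 0; omega
  have h2 : a ≥ 10 ^ (a.toNat + b.toNat) ∨ b ≥ 10 ^ (a.toNat + b.toNat) :=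
    lenLoopB_cond a b (a.toNat + b.toNat + 1) 0 (a.toNat + b.toNat) (Nat.zero_le _) (by omega)
  exact cond_fails_late a b (a.toNat + b.toNat) (le_refl _) h2

-- splitting the low i+1 digits: a % 10^(i+1) = a % 10^i + 10^i * ((a / 10^i) % 10)
lemma emod_pow_succ (a : Int) (i : Nat) :
    a % 10 ^ (i + 1) = a % 10 ^ i + 10 ^ i * ((a / 10 ^ i) % 10) := by
  have hP : (0:Int) < 10 ^ i := by positivity
  have hq : a / 10 ^ i = 10 * (a / 10 ^ i / 10) + (a / 10 ^ i) % 10 := by omega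
  have ha : a = 10 ^ i * (a / 10 ^ i) + a % 10 ^ i := (Int.ediv_add_emod a _).symm
  have hr : 0 ≤ a % 10 ^ i ∧ a % 10 ^ i < 10 ^ i := ⟨Int.emod_nonneg a (by omega), Int.emod_lt_of_pos a hP⟩
  have hd : 0 ≤ (a / 10 ^ i) % 10 ∧ (a / 10 ^ i) % 10 < 10 := by omega
  have key : a = 10 ^ (i+1) * (a / 10 ^ i / 10) + (a % 10 ^ i + 10 ^ i * ((a / 10 ^ i) % 10)) := by
    rw [pow_succ]
    nlinarith [hq, ha]
  calc a % 10 ^ (i+1)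
      = (10 ^ (i+1) * (a / 10 ^ i / 10) + (a % 10 ^ i + 10 ^ i * ((a / 10 ^ i) % 10))) % 10 ^ (i+1) := by
        rw [← key]
    _ = (a % 10 ^ i + 10 ^ i * ((a / 10 ^ i) % 10)) % 10 ^ (i+1) := by
        rw [Int.add_comm, Int.add_mul_emod_self_left]
    _ = a % 10 ^ i + 10 ^ i * ((a / 10 ^ i) % 10) := by
        apply Int.emod_eq_of_lt
        · nlinarith [hr.1, hd.1, hP.le]
        · rw [pow_succ]; nlinarith [hr.2, hd.2, hP]

-- the carry recurrence: the closed-form carry test at i+1 matches A's step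
lemma carry_step (a b : Int) (i : Nat) :
    ((a % 10 ^ (i+1) + b % 10 ^ (i+1) ≥ 10 ^ (i+1)) ↔
      ((a / 10 ^ i) % 10 + (b / 10 ^ i) % 10 +
        (if a % 10 ^ i + b % 10 ^ i ≥ 10 ^ i then (1:Int) else 0) ≥ 10)) := by
  have hP : (0:Int) < 10 ^ i := by positivity
  have hra : 0 ≤ a % 10 ^ i ∧ a % 10 ^ i < 10 ^ i := ⟨Int.emod_nonneg a (by omega), Int.emod_lt_of_pos a hP⟩
  have hrb : 0 ≤ b % 10 ^ i ∧ b % 10 ^ i < 10 ^ i := ⟨Int.emod_nonneg b (by omega), Int.emod_lt_of_pos b hP⟩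
  rw [emod_pow_succ a i, emod_pow_succ b i, pow_succ]
  set da := (a / 10 ^ i) % 10 with hda
  set db := (b / 10 ^ i) % 10 with hdb
  set ra := a % 10 ^ i
  set rb := b % 10 ^ i
  split_ifs with hc
  · constructor
    · intro h
      by_contra hx
      push_neg at hx
      nlinarith
    · intro h
      nlinarith
  · push_neg at hc
    constructor
    · intro h
      by_contra hx
      push_neg at hx
      nlinarith
    · intro h
      nlinarith

-- guard: aa = a/10^i is positive iff a ≥ 10^i
lemma ediv_pos_iff_le (a : Int) (i : Nat) : 0 < a / 10 ^ i ↔ 10 ^ i ≤ a := by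
  have hP : (0:Int) < 10 ^ i := by positivity
  constructor
  · intro h
    have := (Int.le_ediv_iff_mul_le hP).mp h
    omega
  · intro h
    exact (Int.le_ediv_iff_mul_le hP).mpr (by omega)

-- the main correspondence: A's loop from step i equals B's filtered range from i
lemma loopA_eq (a b : Int) : ∀ (fuel i : Nat) (cps : List Int),
    lenLoopB (a.toNat + b.toNat + 1) a b 0 ≤ i + fuel →
    addLoopA fuel (a / 10 ^ i) (b / 10 ^ i)
      (if a % 10 ^ i + b % 10 ^ i ≥ 10 ^ i then (1:Int) else 0) (i : Int) cps
    = cps ++ (PySem.List.pyRange (i : Int) (lenLoopB (a.toNat + b.toNat + 1) a b 0 : Int) 1).filter (carryTest a b) := by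
  intro fuel
  induction fuel with
  | zero =>
      intro i cps hf
      rw [addLoopA, PySem.List.pyRange_one_eq_nil (by exact_mod_cast (by omega : lenLoopB (a.toNat + b.toNat + 1) a b 0 ≤ i)),
          List.filter_nil, List.append_nil]
  | succ fuel ih =>
      intro i cps hf
      by_cases hin : i < lenLoopB (a.toNat + b.toNat + 1) a b 0
      · -- the guard holds
        have hcond : 10 ^ i ≤ a ∨ 10 ^ i ≤ b := (cond_iff_lt_len a b i).mpr hin
        have hguard : 0 < a / 10 ^ i ∨ 0 < b / 10 ^ i := by
          rcases hcond with h | h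
          · exact Or.inl ((ediv_pos_iff_le a i).mpr h)
          · exact Or.inr ((ediv_pos_iff_le b i).mpr h)
        rw [addLoopA]
        simp only [hguard, if_pos,
          PySem.Int.mod_eq_emod_of_pos (by norm_num : (0:Int) < 10),
          PySem.Int.floordiv_eq_ediv_of_pos (by norm_num : (0:Int) < 10)]
        have hdd : ∀ x : Int, x / 10 ^ i / 10 = x / 10 ^ (i + 1) := by
          intro x
          rw [pow_succ]
          exact Int.ediv_ediv_of_nonneg (by positivity)
        have hco :
            (if (a / 10 ^ i) % 10 + (b / 10 ^ i) % 10 +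
                (if a % 10 ^ i + b % 10 ^ i ≥ 10 ^ i then (1:Int) else 0) ≥ 10 then (1:Int) else 0)
            = (if a % 10 ^ (i+1) + b % 10 ^ (i+1) ≥ 10 ^ (i+1) then (1:Int) else 0) := by
          rw [if_congr (Iff.symm (carry_step a b i)) rfl rfl]
        have hrange : PySem.List.pyRange (i : Int) (lenLoopB (a.toNat + b.toNat + 1) a b 0 : Int) 1
            = (i : Int) :: PySem.List.pyRange ((i : Int) + 1) (lenLoopB (a.toNat + b.toNat + 1) a b 0 : Int) 1 :=
          PySem.List.pyRange_one_cons (by exact_mod_cast hin)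
        have htest : carryTest a b (i : Int)
            = decide (a % 10 ^ (i+1) + b % 10 ^ (i+1) ≥ 10 ^ (i+1)) := by
          simp [carryTest, PySem.Int.mod_eq_emod_of_pos (by positivity : (0:Int) < 10 ^ (i+1))]
        rw [hco, hdd a, hdd b]
        have hcast : ((i : Int) + 1) = ((i + 1 : Nat) : Int) := by push_cast; ring
        rw [hcast]
        by_cases hc : a % 10 ^ (i+1) + b % 10 ^ (i+1) ≥ 10 ^ (i+1)
        · rw [if_pos hc]
          simp only [ne_eq, one_ne_zero, not_false_eq_true, if_true]
          have ih' := ih (i + 1) (cps ++ [(i : Int)]) (by omega)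
          rw [if_pos hc] at ih'
          rw [ih', hrange, List.filter_cons]
          simp [htest, hc]
        · rw [if_neg hc]
          simp only [ne_eq, not_true_eq_false, if_false]
          have ih' := ih (i + 1) cps (by omega)
          rw [if_neg hc] at ih'
          rw [ih', hrange, List.filter_cons]
          simp [htest, hc]
      · -- the guard fails and the range is empty
        have hcond : ¬ (10 ^ i ≤ a ∨ 10 ^ i ≤ b) := fun h => hin ((cond_iff_lt_len a b i).mp h)
        push_neg at hcond
        have hga : ¬ 0 < a / 10 ^ i := fun h => by have := (ediv_pos_iff_le a i).mp h; omega
        have hgb : ¬ 0 < b / 10 ^ i := fun h => by have := (ediv_pos_iff_le b i).mp h; omega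
        rw [addLoopA, if_neg (by push_neg; exact ⟨by omega, by omega⟩),
            PySem.List.pyRange_one_eq_nil (by exact_mod_cast Nat.le_of_not_lt hin), List.filter_nil,
            List.append_nil]

-- ===== VERDICT (by name: the statement is the Claim_ definition above) =====
theorem add_answer_and_carries_py_spec : Claim_equal_add_answer_and_carries_py := by
  intro a b _
  unfold Spec_add_answer_and_carries_py add_answer_and_carries_py add_answer_and_carries_py_alt
  have hb := len_le_bound a b
  have h := loopA_eq a b (a.toNat + b.toNat + 1) 0 [] (by omega)
  simp only [pow_zero, Int.ediv_one, Int.emod_one, Nat.cast_zero] at h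
  rw [show (if (0:Int) + 0 ≥ 1 then (1:Int) else 0) = 0 by norm_num] at h
  rw [h, List.nil_append]
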